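-- pv_equiv track=rewrite | github.com/mai-anh-tuan-anh/My-project | kiem tra so dep.py | check
-- ===== SOURCE A (Python) =====
-- def check(n):
--     lst=list(n)
--     st=set(lst)
--     if len(st)>2: return False
--     for i in range(int(len(lst))-2):
--         if(lst[i]!=lst[i+2]):
--             return False
--     return True
-- ===== SOURCE B (Python) =====
-- def check(n):
--     even, odd = set(), set()
--     for i, c in enumerate(n):
--         if i % 2 == 0:
--             even.add(c)
--         else:
--             odd.add(c)
--     return len(even) <= 1 and len(odd) <= 1
-- ===== Notes on version B (the rewrite author's own statement) =====
-- stated objective: alternative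
-- what changed: B makes a single enumerate pass that partitions characters into an even-index set and an odd-index set and returns True iff each set has at most one element, replacing A's global distinct-count guard plus pairwise lst[i]==lst[i+2] index scan.
import Mathlib
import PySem

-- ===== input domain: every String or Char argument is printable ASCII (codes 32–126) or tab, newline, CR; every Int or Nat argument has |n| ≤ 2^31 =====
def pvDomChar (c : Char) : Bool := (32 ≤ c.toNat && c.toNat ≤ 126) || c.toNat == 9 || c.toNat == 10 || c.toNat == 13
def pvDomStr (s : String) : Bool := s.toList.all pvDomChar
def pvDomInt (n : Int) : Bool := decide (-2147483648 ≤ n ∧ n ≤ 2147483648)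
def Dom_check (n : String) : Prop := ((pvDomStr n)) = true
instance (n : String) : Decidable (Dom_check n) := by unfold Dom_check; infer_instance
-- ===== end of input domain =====

-- B replaces A's distinct-count guard + pairwise lst[i]==lst[i+2] scan by one enumerate pass
-- that partitions the characters into even-index and odd-index sets and checks each has ≤ 1 element.

-- ===== PORT A =====
-- loop indices i satisfy 0 ≤ i and i+2 < len, so pyGet? is `some` on both sides (exact)
def check (n : String) : Bool :=
  let lst := n.toList
  let st := PySem.Set.ofList lst
  if 2 < PySem.Set.len st then false
  else
    (PySem.List.pyRange 0 (PySem.List.len lst - 2) 1).all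
      (fun i => PySem.List.pyGet? lst i == PySem.List.pyGet? lst (i + 2))

-- ===== PORT B =====
def stepB (st : PySem.Set Char × PySem.Set Char) (ic : Int × Char) :
    PySem.Set Char × PySem.Set Char :=
  if PySem.Int.mod ic.1 2 == 0 then (PySem.Set.add st.1 ic.2, st.2)
  else (st.1, PySem.Set.add st.2 ic.2)

def check_alt (n : String) : Bool :=
  let eo := (PySem.List.enumerate n.toList 0).foldl stepB
      ((PySem.Set.empty : PySem.Set Char), (PySem.Set.empty : PySem.Set Char))
  decide (PySem.Set.len eo.1 ≤ 1) && decide (PySem.Set.len eo.2 ≤ 1)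

-- ===== PRECONDITION & SPEC =====
def Spec_check (n : String) (out : Bool) : Prop := out = check_alt n
instance (n : String) (out : Bool) : Decidable (Spec_check n out) := by unfold Spec_check; infer_instance

-- ===== CLAIM (what is proved, stated in full; the proofs are below) =====
def Claim_equal_check : Prop := ∀ (n : String), Dom_check n → Spec_check n (check n)

-- ===== LEMMAS AND PROOFS =====

/-- Characters at even indices (0,2,4,…). -/
def evens : List Char → List Char
  | [] => []
  | [a] => [a]
  | a :: _ :: t => a :: evens t

/-- A's loop condition as a predicate. -/
def Chain2 (l : List Char) : Prop := ∀ i : Nat, i + 2 < l.length → l[i]? = l[i + 2]?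

/-- B's condition as a predicate. -/
def Nice (l : List Char) : Prop :=
  (evens l).Pairwise (· = ·) ∧ (evens l.tail).Pairwise (· = ·)

theorem evens_cons (x : Char) (xs : List Char) : evens (x :: xs) = x :: evens xs.tail := by
  cases xs <;> rfl

theorem pairwise_eq_iff (xs : List Char) :
    xs.Pairwise (· = ·) ↔ ∀ a ∈ xs, ∀ b ∈ xs, a = b := by
  induction xs with
  | nil => simp
  | cons x t ih =>
    simp only [List.pairwise_cons, ih, List.mem_cons]
    constructor
    · rintro ⟨h1, h2⟩ a (rfl | ha) b (rfl | hb)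
      · rfl
      · exact h1 b hb
      · exact (h1 a ha).symm
      · exact h2 a ha b hb
    · intro h
      exact ⟨fun y hy => h x (Or.inl rfl) y (Or.inr hy),
             fun a ha b hb => h a (Or.inr ha) b (Or.inr hb)⟩

theorem mem_evens_or (x : Char) (l : List Char) (hx : x ∈ l) :
    x ∈ evens l ∨ x ∈ evens l.tail := by
  induction l with
  | nil => simp at hx
  | cons a t ih =>
    rw [evens_cons]
    rcases List.mem_cons.mp hx with rfl | hmem
    · exact Or.inl (List.mem_cons_self ..)
    · rcases ih hmem with h | h
      · exact Or.inr h
      · exact Or.inl (List.mem_cons_of_mem _ h)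

theorem chain2_cons (x : Char) (xs : List Char) :
    Chain2 (x :: xs) ↔ (1 < xs.length → some x = xs[1]?) ∧ Chain2 xs := by
  constructor
  · intro h
    constructor
    · intro hlen
      have := h 0 (by simp; omega)
      simpa using this
    · intro i hi
      have := h (i + 1) (by simp; omega)
      simpa using this
  · rintro ⟨h0, h⟩ i hi
    cases i with
    | zero => simpa using h0 (by simp at hi; omega)
    | succ j =>
      have := h j (by simp at hi; omega)
      simpa using this

theorem chain2_iff_nice (l : List Char) : Chain2 l ↔ Nice l := by
  induction l with
  | nil => simp [Chain2, Nice, evens]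
  | cons x xs ih =>
    rw [chain2_cons, ih]
    unfold Nice
    rw [evens_cons]
    simp only [List.tail_cons, List.pairwise_cons]
    constructor
    · rintro ⟨h0, he, ho⟩
      refine ⟨⟨?_, ho⟩, he⟩
      intro y hy
      match xs, hy with
      | a :: b :: t, hy =>
        rw [List.tail_cons, evens_cons] at hy
        have hx : x = b := by simpa using h0 (by simp)
        rcases List.mem_cons.mp hy with rfl | hy'
        · exact hx
        · rw [List.tail_cons, evens_cons, List.pairwise_cons] at ho
          exact hx.trans (ho.1 y hy')
    · rintro ⟨⟨hxall, ho⟩, he⟩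
      refine ⟨?_, he, ho⟩
      intro hlen
      match xs, hlen with
      | a :: b :: t, _ =>
        have : b ∈ evens (a :: b :: t).tail := by
          rw [List.tail_cons, evens_cons]; exact List.mem_cons_self ..
        simpa using hxall b this

-- a Nodup list whose elements all lie in two homogeneous classes has length ≤ 2
theorem nice_card_le (l : List Char) (h : Nice l) :
    (PySem.Set.ofList l).length ≤ 2 := by
  by_contra hgt
  push_neg at hgt
  obtain ⟨c1, c2, c3, t, h3⟩ : ∃ c1 c2 c3 t, PySem.Set.ofList l = c1 :: c2 :: c3 :: t := by
    match hm : PySem.Set.ofList l with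
    | [] => rw [hm] at hgt; simp at hgt
    | [a] => rw [hm] at hgt; simp at hgt
    | [a, b] => rw [hm] at hgt; simp at hgt
    | a :: b :: c :: t => exact ⟨a, b, c, t, rfl⟩
  have hnd := PySem.Set.nodup_ofList (xs := l)
  rw [h3] at hnd
  have h12 : c1 ≠ c2 := by simp [List.nodup_cons] at hnd; tauto
  have h13 : c1 ≠ c3 := by simp [List.nodup_cons] at hnd; tauto
  have h23 : c2 ≠ c3 := by simp [List.nodup_cons] at hnd; tauto
  have hmem : ∀ c, c ∈ (c1 :: c2 :: c3 :: t) → c ∈ evens l ∨ c ∈ evens l.tail := by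
    intro c hc
    apply mem_evens_or
    have : c ∈ PySem.Set.ofList l := h3 ▸ hc
    exact (PySem.Set.mem_ofList _ _).mp this
  have he := (pairwise_eq_iff _).mp h.1
  have ho := (pairwise_eq_iff _).mp h.2
  have k1 := hmem c1 (by simp)
  have k2 := hmem c2 (by simp)
  have k3 := hmem c3 (by simp)
  rcases k1 with k1 | k1 <;> rcases k2 with k2 | k2 <;> rcases k3 with k3 | k3
  · exact h12 (he _ k1 _ k2)
  · exact h12 (he _ k1 _ k2)
  · exact h13 (he _ k1 _ k3)
  · exact h23 (ho _ k2 _ k3)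
  · exact h23 (he _ k2 _ k3)
  · exact h13 (ho _ k1 _ k3)
  · exact h12 (ho _ k1 _ k2)
  · exact h12 (ho _ k1 _ k2)

theorem ofList_len_le_one_iff (xs : List Char) :
    (PySem.Set.ofList xs).length ≤ 1 ↔ xs.Pairwise (· = ·) := by
  constructor
  · intro h
    rw [pairwise_eq_iff]
    intro a ha b hb
    have ha' := (PySem.Set.mem_ofList _ _).mpr ha
    have hb' := (PySem.Set.mem_ofList _ _).mpr hb
    match hm : PySem.Set.ofList xs with
    | [] => rw [hm] at ha'; simp at ha'
    | [c] =>
      rw [hm] at ha' hb'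
      simp at ha' hb'
      rw [ha', hb']
    | c :: d :: t => rw [hm] at h; simp at h
  · intro h
    by_contra hgt
    push_neg at hgt
    obtain ⟨c1, c2, t, h2⟩ : ∃ c1 c2 t, PySem.Set.ofList xs = c1 :: c2 :: t := by
      match hm : PySem.Set.ofList xs with
      | [] => rw [hm] at hgt; simp at hgt
      | [a] => rw [hm] at hgt; simp at hgt
      | a :: b :: t => exact ⟨a, b, t, rfl⟩
    have hnd := PySem.Set.nodup_ofList (xs := xs)
    rw [h2] at hnd
    have h12 : c1 ≠ c2 := by simp [List.nodup_cons] at hnd; tauto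
    have hc1 : c1 ∈ xs := (PySem.Set.mem_ofList _ _).mp (h2 ▸ List.mem_cons_self ..)
    have hc2 : c2 ∈ xs := (PySem.Set.mem_ofList _ _).mp (h2 ▸ List.mem_cons_of_mem _ (List.mem_cons_self ..))
    exact h12 ((pairwise_eq_iff _).mp h _ hc1 _ hc2)

theorem foldB_eq (l : List Char) : ∀ (s : Int) (e o : PySem.Set Char),
    (PySem.List.enumerate l s).foldl stepB (e, o) =
      if s % 2 = 0 then (PySem.Set.update e (evens l), PySem.Set.update o (evens l.tail))
      else (PySem.Set.update e (evens l.tail), PySem.Set.update o (evens l)) := by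
  induction l with
  | nil => intro s e o; simp [PySem.List.enumerate_nil, PySem.Set.update_nil, evens]
  | cons x xs ih =>
    intro s e o
    rw [PySem.List.enumerate_cons, List.foldl_cons]
    have hmodeq : PySem.Int.mod s 2 = s % 2 := by
      show s.fmod 2 = s % 2
      rw [Int.fmod_eq_emod]
      omega
    have hmod : (PySem.Int.mod s 2 == 0) = decide (s % 2 = 0) := by
      rw [hmodeq]
      rcases Int.emod_two_eq_zero_or_one s with h | h <;> simp [h]
    by_cases hs : s % 2 = 0
    · have hs1 : ¬ ((s + 1) % 2 = 0) := by omega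
      simp only [stepB, hmod, hs, decide_true, if_pos]
      rw [ih (s + 1)]
      simp only [if_neg hs1, evens_cons, List.tail_cons,
        PySem.Set.update_cons]
    · have hs1 : (s + 1) % 2 = 0 := by omega
      simp only [stepB, hmod, hs, decide_false, Bool.false_eq_true, if_false]
      rw [ih (s + 1)]
      simp only [if_pos hs1, evens_cons, List.tail_cons,
        PySem.Set.update_cons]

theorem check_alt_expand (n : String) :
    check_alt n =
      (decide (PySem.Set.len (((PySem.List.enumerate n.toList 0).foldl stepB
          ((PySem.Set.empty : PySem.Set Char), (PySem.Set.empty : PySem.Set Char))).1) ≤ 1) &&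
       decide (PySem.Set.len (((PySem.List.enumerate n.toList 0).foldl stepB
          ((PySem.Set.empty : PySem.Set Char), (PySem.Set.empty : PySem.Set Char))).2) ≤ 1)) := rfl

theorem len_le_one_iff (xs : List Char) :
    PySem.Set.len (PySem.Set.ofList xs) ≤ 1 ↔ xs.Pairwise (· = ·) := by
  rw [← ofList_len_le_one_iff]
  show ((PySem.Set.ofList xs).length : Int) ≤ 1 ↔ _
  omega

theorem check_alt_iff (n : String) : check_alt n = true ↔ Nice n.toList := by
  rw [check_alt_expand, foldB_eq]
  have h0 : ((0 : Int) % 2 = 0) := rfl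
  rw [if_pos h0]
  simp only [PySem.Set.update_empty, Bool.and_eq_true, decide_eq_true_eq,
    len_le_one_iff]
  exact Iff.rfl

theorem check_expand (n : String) :
    check n =
      (if 2 < PySem.Set.len (PySem.Set.ofList n.toList) then false
       else (PySem.List.pyRange 0 (PySem.List.len n.toList - 2) 1).all
         (fun i => PySem.List.pyGet? n.toList i == PySem.List.pyGet? n.toList (i + 2))) := rfl

theorem loop_iff (l : List Char) :
    ((PySem.List.pyRange 0 (PySem.List.len l - 2) 1).all
      (fun i => PySem.List.pyGet? l i == PySem.List.pyGet? l (i + 2))) = true ↔ Chain2 l := by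
  rw [List.all_eq_true]
  constructor
  · intro h i hi
    have hm : (i : Int) ∈ PySem.List.pyRange 0 (PySem.List.len l - 2) 1 := by
      rw [PySem.List.mem_pyRange_one]
      simp only [PySem.List.len_eq]
      omega
    have := h _ hm
    simp only [beq_iff_eq] at this
    have g1 : PySem.List.pyGet? l (i : Int) = l[i]? := PySem.List.pyGet?_natCast ..
    have g2 : PySem.List.pyGet? l ((i : Int) + 2) = l[i + 2]? := by
      have : ((i : Int) + 2) = ((i + 2 : Nat) : Int) := by push_cast; ring
      rw [this]; exact PySem.List.pyGet?_natCast ..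
    rwa [g1, g2] at this
  · intro h i hi
    rw [PySem.List.mem_pyRange_one] at hi
    simp only [PySem.List.len_eq] at hi
    obtain ⟨k, rfl⟩ : ∃ k : Nat, i = (k : Int) := ⟨i.toNat, (Int.toNat_of_nonneg hi.1).symm⟩
    have hk : k + 2 < l.length := by omega
    have g1 : PySem.List.pyGet? l (k : Int) = l[k]? := PySem.List.pyGet?_natCast ..
    have g2 : PySem.List.pyGet? l ((k : Int) + 2) = l[k + 2]? := by
      have : ((k : Int) + 2) = ((k + 2 : Nat) : Int) := by push_cast; ring
      rw [this]; exact PySem.List.pyGet?_natCast ..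
    simp only [beq_iff_eq, g1, g2]
    exact h k hk

-- ===== VERDICT (by name: the statement is the Claim_ definition above) =====
theorem check_spec : Claim_equal_check := by
  intro n _
  unfold Spec_check
  rw [check_expand]
  by_cases hN : Nice n.toList
  · rw [(check_alt_iff n).mpr hN]
    have hchain : Chain2 n.toList := (chain2_iff_nice _).mpr hN
    have hcard := nice_card_le _ hN
    have hguard : ¬ (2 < PySem.Set.len (PySem.Set.ofList n.toList)) := by
      show ¬ (2 < ((PySem.Set.ofList n.toList).length : Int))
      omega
    rw [if_neg hguard]
    exact (loop_iff _).mpr hchain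
  · have hfalse : check_alt n = false := by
      cases h : check_alt n
      · rfl
      · exact absurd ((check_alt_iff n).mp h) hN
    rw [hfalse]
    by_cases hguard : 2 < PySem.Set.len (PySem.Set.ofList n.toList)
    · rw [if_pos hguard]
    · rw [if_neg hguard]
      have hnc : ¬ Chain2 n.toList := fun hc => hN ((chain2_iff_nice _).mp hc)
      cases h : ((PySem.List.pyRange 0 (PySem.List.len n.toList - 2) 1).all
          (fun i => PySem.List.pyGet? n.toList i == PySem.List.pyGet? n.toList (i + 2)))
      · rfl
      · exact absurd ((loop_iff _).mp h) hnc
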